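-- pv_equiv track=rewrite | github.com/jhg3410/Algorithm | 코드트리/회전하는 빙하/회전하는 빙하.py | rotate_small
-- ===== SOURCE A (Python) =====
-- def rotate_small(rotate_board: list[list[int]], level: int):
--     small_size = 2 ** level
--     small_small_size = 2 ** (level - 1)
--     rotated = [[0 for _ in range(small_size)] for _ in range(small_size)]
--     for i in range(small_size):
--         for j in range(small_size):
--             # 1
--             if i in range(small_small_size) and j in range(small_small_size):
--                 rotated[i][j + small_small_size] = rotate_board[i][j]
--             # 2
--             elif i in range(small_small_size) and j in range(small_small_size, small_size):
--                 rotated[i + small_small_size][j] = rotate_board[i][j]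
--             # 3
--             elif i in range(small_small_size, small_size) and j in range(small_small_size, small_size):
--                 rotated[i][j - small_small_size] = rotate_board[i][j]
--             # 4
--             else:
--                 rotated[i - small_small_size][j] = rotate_board[i][j]
--     return rotated
-- ===== SOURCE B (Python) =====
-- def rotate_small(rotate_board: list[list[int]], level: int):
--     half = 2 ** (level - 1)
--     size = 2 * half
--     top = [rotate_board[i + half][:half] + rotate_board[i][:half] for i in range(half)]
--     bottom = [rotate_board[i + half][half:size] + rotate_board[i][half:size] for i in range(half)]
--     return top + bottom
-- ===== Notes on version B (the rewrite author's own statement) =====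
-- stated objective: alternative
-- what changed: A fills the rotated grid cell by cell, dispatching each of the s*s cells through a chain of quadrant-membership tests and in-place writes; B builds each output row directly as the concatenation of two half-row slices of the input, with no mutation and no per-cell branching.
import Mathlib
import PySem

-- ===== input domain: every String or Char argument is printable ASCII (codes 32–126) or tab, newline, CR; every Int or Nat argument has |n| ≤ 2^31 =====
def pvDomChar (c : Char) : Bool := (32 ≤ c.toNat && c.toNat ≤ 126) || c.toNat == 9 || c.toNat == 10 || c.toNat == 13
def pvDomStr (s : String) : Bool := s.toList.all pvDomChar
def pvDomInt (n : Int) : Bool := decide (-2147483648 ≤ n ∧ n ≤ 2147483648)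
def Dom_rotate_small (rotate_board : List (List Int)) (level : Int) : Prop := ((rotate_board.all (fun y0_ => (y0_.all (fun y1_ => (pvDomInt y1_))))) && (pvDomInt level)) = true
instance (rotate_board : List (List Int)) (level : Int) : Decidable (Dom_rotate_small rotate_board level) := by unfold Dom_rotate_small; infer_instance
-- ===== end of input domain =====

-- B replaces A's per-cell quadrant dispatch by building each output row directly from two
-- half-row slices of the input (objective: alternative decomposition, no mutation or per-cell branching).


-- ===== PORT A =====
-- rotate_board[i][j] for 0 ≤ i,j (exact under Pre_, where all indices are in range; Python raises outside Pre_)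
def pvGet2 (g : List (List Int)) (i j : Nat) : Int := (g.getD i []).getD j 0

-- rotated[i][j] = v (exact: under Pre_ every written index is in range of the s×s zero grid)
def pvSet2 (g : List (List Int)) (i j : Nat) (v : Int) : List (List Int) :=
  g.set i ((g.getD i []).set j v)

-- Transliteration of A.  '2 ** level' → 2 ^ level.toNat (exact for level ≥ 1; for level ≤ 0
-- Python raises a TypeError inside range(), excluded by Pre_).  'i in range(h)' with i ≥ 0 is i < h;
-- 'j in range(h, s)' is h ≤ j ∧ j < s.  Loops become foldl over List.range.
def rotate_small (rotate_board : List (List Int)) (level : Int) : List (List Int) :=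
  let s := 2 ^ level.toNat
  let h := 2 ^ (level - 1).toNat
  let rotated := List.replicate s (List.replicate s (0 : Int))
  (List.range s).foldl (fun rot i =>
    (List.range s).foldl (fun rot j =>
      if i < h ∧ j < h then pvSet2 rot i (j + h) (pvGet2 rotate_board i j)
      else if i < h ∧ h ≤ j ∧ j < s then pvSet2 rot (i + h) j (pvGet2 rotate_board i j)
      else if h ≤ i ∧ i < s ∧ h ≤ j ∧ j < s then pvSet2 rot i (j - h) (pvGet2 rotate_board i j)
      else pvSet2 rot (i - h) j (pvGet2 rotate_board i j)) rot) rotated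

-- ===== PORT B =====
-- Transliteration of Source B.  row[:half] → take half, row[half:size] → (drop half).take half
-- (exact: Python slices with these non-negative bounds clamp exactly like take/drop).
-- rotate_board[i] → getD i [] (exact under Pre_, where i is always in range).
def rotate_small_alt (rotate_board : List (List Int)) (level : Int) : List (List Int) :=
  let h := 2 ^ (level - 1).toNat
  let top := (List.range h).map (fun i =>
    (rotate_board.getD (i + h) []).take h ++ (rotate_board.getD i []).take h)
  let bottom := (List.range h).map (fun i =>
    ((rotate_board.getD (i + h) []).drop h).take h ++ ((rotate_board.getD i []).drop h).take h)
  top ++ bottom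

-- ===== PRECONDITION & SPEC =====
-- Pre_ holds exactly where Python A returns: level ≥ 1 (level ≤ 0 raises TypeError since
-- 2**(level-1) is a float), and the board has at least 2^level rows whose first 2^level rows
-- each have at least 2^level entries (otherwise A raises IndexError).  The conjunct
-- 'level ≤ length' is implied by the size bound (2^level > level); it only lets the Decidable
-- instance short-circuit before computing 2^level for huge level.
def Pre_rotate_small (rotate_board : List (List Int)) (level : Int) : Prop :=
  1 ≤ level ∧ level ≤ (rotate_board.length : Int) ∧
  2 * 2 ^ (level - 1).toNat ≤ rotate_board.length ∧
  ∀ row ∈ rotate_board.take (2 * 2 ^ (level - 1).toNat), 2 * 2 ^ (level - 1).toNat ≤ row.length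
instance (rotate_board : List (List Int)) (level : Int) : Decidable (Pre_rotate_small rotate_board level) := by unfold Pre_rotate_small; infer_instance

def pvWitness_rotate_small : List (List Int) × Int := ([[1, 2], [3, 4]], 1)

def Spec_rotate_small (rotate_board : List (List Int)) (level : Int) (out : List (List Int)) : Prop := out = rotate_small_alt rotate_board level
instance (rotate_board : List (List Int)) (level : Int) (out : List (List Int)) : Decidable (Spec_rotate_small rotate_board level out) := by unfold Spec_rotate_small; infer_instance

-- ===== CLAIM (what is proved, stated in full; the proofs are below) =====
def Claim_equal_rotate_small : Prop := ∀ (rotate_board : List (List Int)) (level : Int), Dom_rotate_small rotate_board level → Pre_rotate_small rotate_board level → Spec_rotate_small rotate_board level (rotate_small rotate_board level)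

-- ===== LEMMAS AND PROOFS =====

-- getD through set
theorem pv_getD_set_self (l : List (List Int)) (i : Nat) (x : List Int) (h : i < l.length) :
    (l.set i x).getD i [] = x := by
  simp [List.getD_eq_getElem?_getD, List.getElem?_set_self h]

theorem pv_getD_set_ne (l : List (List Int)) (i r : Nat) (x : List Int) (h : i ≠ r) :
    (l.set i x).getD r [] = l.getD r [] := by
  simp [List.getD_eq_getElem?_getD, List.getElem?_set_ne h]

-- shape: an s × s grid
def pvShape (s : Nat) (g : List (List Int)) : Prop :=
  g.length = s ∧ ∀ r < s, (g.getD r []).length = s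

theorem pvShape_set2 {s : Nat} {g : List (List Int)} (hs : pvShape s g) (i j : Nat) (v : Int) :
    pvShape s (pvSet2 g i j v) := by
  obtain ⟨hl, hr⟩ := hs
  refine ⟨by simp [pvSet2, hl], ?_⟩
  intro r hrs
  by_cases hir : i = r
  · subst hir
    by_cases hil : i < g.length
    · rw [pvSet2, pv_getD_set_self _ _ _ hil]
      simp only [List.length_set]
      exact hr i hrs
    · omega
  · rw [pvSet2, pv_getD_set_ne _ _ _ _ hir]; exact hr r hrs

theorem pv_get2_set2_self {s : Nat} {g : List (List Int)} (hs : pvShape s g)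
    {i j : Nat} (hi : i < s) (hj : j < s) (v : Int) :
    pvGet2 (pvSet2 g i j v) i j = v := by
  obtain ⟨hl, hr⟩ := hs
  have hil : i < g.length := by omega
  rw [pvGet2, pvSet2, pv_getD_set_self _ _ _ hil]
  have : j < (g.getD i []).length := by rw [hr i hi]; exact hj
  rw [List.getD_eq_getElem?_getD] at this ⊢
  simp [List.getElem?_set_self this]

theorem pv_get2_set2_ne {g : List (List Int)} {i j r c : Nat}
    (hne : (r, c) ≠ (i, j)) (v : Int) :
    pvGet2 (pvSet2 g i j v) r c = pvGet2 g r c := by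
  by_cases hir : i = r
  · subst hir
    have hcj : c ≠ j := by intro h; exact hne (by simp [h])
    by_cases hil : i < g.length
    · rw [pvGet2, pvSet2, pv_getD_set_self _ _ _ hil, pvGet2]
      simp [List.getD_eq_getElem?_getD, List.getElem?_set_ne (by omega : j ≠ c)]
    · rw [pvGet2, pvSet2, List.set_eq_of_length_le (by omega), pvGet2]
  · rw [pvGet2, pvSet2, pv_getD_set_ne _ _ _ _ hir, pvGet2]

-- apply a list of writes ((row, col), value) in order
def pvApply (g : List (List Int)) (ws : List ((Nat × Nat) × Int)) : List (List Int) :=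
  ws.foldl (fun g w => pvSet2 g w.1.1 w.1.2 w.2) g

theorem pvApply_shape {s : Nat} (ws : List ((Nat × Nat) × Int)) {g : List (List Int)}
    (hs : pvShape s g) : pvShape s (pvApply g ws) := by
  induction ws generalizing g with
  | nil => exact hs
  | cons w ws ih => exact ih (pvShape_set2 hs _ _ _)

-- the value at (r,c) after applying writes: if every write to (r,c) carries value v and either
-- the grid already holds v there or some write targets (r,c), the result holds v at (r,c)
theorem pvApply_at {s : Nat} (ws : List ((Nat × Nat) × Int)) {g : List (List Int)}
    {r c : Nat} {v : Int}
    (hs : pvShape s g) (hr : r < s) (hc : c < s)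
    (hall : ∀ w ∈ ws, w.1 = (r, c) → w.2 = v)
    (hin : ∀ w ∈ ws, w.1.1 < s ∧ w.1.2 < s)
    (hex : pvGet2 g r c = v ∨ ∃ w ∈ ws, w.1 = (r, c)) :
    pvGet2 (pvApply g ws) r c = v := by
  induction ws generalizing g with
  | nil =>
    rcases hex with h | h
    · exact h
    · simp at h
  | cons w ws ih =>
    have hstep : pvApply g (w :: ws) = pvApply (pvSet2 g w.1.1 w.1.2 w.2) ws := by
      simp [pvApply]
    rw [hstep]
    have hs' := pvShape_set2 hs w.1.1 w.1.2 w.2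
    refine ih hs' (fun x hx => hall x (by simp [hx])) (fun x hx => hin x (by simp [hx])) ?_
    by_cases hw : w.1 = (r, c)
    · left
      have : w.1.1 = r ∧ w.1.2 = c := by rw [Prod.ext_iff] at hw; exact hw
      obtain ⟨h1, h2⟩ := this
      rw [h1, h2] at hs' ⊢
      rw [pv_get2_set2_self hs hr hc]
      exact hall w (by simp) hw
    · rcases hex with h | h
      · left; rw [pv_get2_set2_ne (fun e => hw e.symm)]; exact h
      · obtain ⟨x, hx, hxt⟩ := h
        rcases List.mem_cons.mp hx with rfl | hx'
        · exact absurd hxt hw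
        · exact Or.inr ⟨x, hx', hxt⟩

-- the cell A's branch (i, j) writes to
def pvTgt (h s i j : Nat) : Nat × Nat :=
  if i < h ∧ j < h then (i, j + h)
  else if i < h ∧ h ≤ j ∧ j < s then (i + h, j)
  else if h ≤ i ∧ i < s ∧ h ≤ j ∧ j < s then (i, j - h)
  else (i - h, j)

-- all writes A performs, in loop order
def pvWrites (board : List (List Int)) (h s : Nat) : List ((Nat × Nat) × Int) :=
  (List.range s).flatMap (fun i => (List.range s).map (fun j => (pvTgt h s i j, pvGet2 board i j)))

theorem rotate_small_eq_apply (board : List (List Int)) (level : Int) :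
    rotate_small board level =
      pvApply (List.replicate (2 ^ level.toNat) (List.replicate (2 ^ level.toNat) (0 : Int)))
              (pvWrites board (2 ^ (level - 1).toNat) (2 ^ level.toNat)) := by
  unfold rotate_small pvApply pvWrites
  rw [List.foldl_flatMap]
  simp only [List.foldl_map]
  congr 1
  funext rot i
  congr 1
  funext rot j
  unfold pvTgt
  split_ifs <;> rfl

-- the source cell whose value ends up at (r, c)
def pvSrc (board : List (List Int)) (h r c : Nat) : Int :=
  if r < h then (if c < h then pvGet2 board (r + h) c else pvGet2 board r (c - h))
  else (if c < h then pvGet2 board r (c + h) else pvGet2 board (r - h) c)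

theorem pvWrites_mem {board : List (List Int)} {h : Nat} {w : (Nat × Nat) × Int}
    (hw : w ∈ pvWrites board h (2 * h)) :
    ∃ i < 2 * h, ∃ j < 2 * h, w = (pvTgt h (2 * h) i j, pvGet2 board i j) := by
  simp only [pvWrites, List.mem_flatMap, List.mem_map, List.mem_range] at hw
  obtain ⟨i, hi, j, hj, he⟩ := hw
  exact ⟨i, hi, j, hj, he.symm⟩

theorem pvTgt_value {board : List (List Int)} {h i j r c : Nat}
    (hi : i < 2 * h) (hj : j < 2 * h) (ht : pvTgt h (2 * h) i j = (r, c)) :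
    pvGet2 board i j = pvSrc board h r c := by
  unfold pvTgt at ht
  unfold pvSrc
  split_ifs at ht with h1 h2 h3 <;>
    (simp only [Prod.mk.injEq] at ht; obtain ⟨h4, h5⟩ := ht; subst h4; subst h5)
  · rw [if_pos (by omega), if_neg (by omega)]; congr 1; omega
  · rw [if_neg (by omega), if_neg (by omega)]; congr 1; omega
  · rw [if_neg (by omega), if_pos (by omega)]; congr 1; omega
  · rw [if_pos (by omega), if_pos (by omega)]; congr 1; omega

theorem pvTgt_lt {h i j : Nat} (hi : i < 2 * h) (hj : j < 2 * h) :
    (pvTgt h (2 * h) i j).1 < 2 * h ∧ (pvTgt h (2 * h) i j).2 < 2 * h := by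
  unfold pvTgt
  split_ifs <;> constructor <;> simp <;> omega

theorem pvTgt_surj {h r c : Nat} (board : List (List Int)) (hr : r < 2 * h) (hc : c < 2 * h) :
    ∃ w ∈ pvWrites board h (2 * h), w.1 = (r, c) := by
  have hmem : ∀ i < 2 * h, ∀ j < 2 * h,
      (pvTgt h (2 * h) i j, pvGet2 board i j) ∈ pvWrites board h (2 * h) := by
    intro i hi j hj
    simp only [pvWrites, List.mem_flatMap, List.mem_map, List.mem_range]
    exact ⟨i, hi, j, hj, rfl⟩
  by_cases h1 : r < h
  · by_cases h2 : c < h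
    · refine ⟨_, hmem (r + h) (by omega) c (by omega), ?_⟩
      unfold pvTgt
      rw [if_neg (by omega), if_neg (by omega), if_neg (by omega)]
      simp only [Prod.mk.injEq]
      exact ⟨by omega, trivial⟩
    · refine ⟨_, hmem r (by omega) (c - h) (by omega), ?_⟩
      unfold pvTgt
      rw [if_pos (by omega)]
      simp only [Prod.mk.injEq]
      exact ⟨trivial, by omega⟩
  · by_cases h2 : c < h
    · refine ⟨_, hmem r (by omega) (c + h) (by omega), ?_⟩
      unfold pvTgt
      rw [if_neg (by omega), if_neg (by omega), if_pos (by omega)]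
      simp only [Prod.mk.injEq]
      exact ⟨trivial, by omega⟩
    · refine ⟨_, hmem (r - h) (by omega) c (by omega), ?_⟩
      unfold pvTgt
      rw [if_neg (by omega), if_pos (by omega)]
      simp only [Prod.mk.injEq]
      exact ⟨by omega, trivial⟩

theorem pvShape_replicate (s : Nat) :
    pvShape s (List.replicate s (List.replicate s (0 : Int))) := by
  refine ⟨by simp, ?_⟩
  intro r hr
  simp [List.getD_eq_getElem?_getD, hr]

-- characterization of A's result per cell
theorem rotate_small_at {board : List (List Int)} {level : Int} {h r c : Nat}
    (hh : h = 2 ^ (level - 1).toNat) (hs : 2 ^ level.toNat = 2 * h)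
    (hr : r < 2 * h) (hc : c < 2 * h) :
    pvGet2 (rotate_small board level) r c = pvSrc board h r c := by
  rw [rotate_small_eq_apply, ← hh, hs]
  refine pvApply_at (s := 2 * h) _ (pvShape_replicate (2 * h)) hr hc ?_ ?_ ?_
  · intro w hw hwt
    obtain ⟨i, hi, j, hj, rfl⟩ := pvWrites_mem hw
    exact pvTgt_value hi hj hwt
  · intro w hw
    obtain ⟨i, hi, j, hj, rfl⟩ := pvWrites_mem hw
    exact pvTgt_lt hi hj
  · exact Or.inr (pvTgt_surj board hr hc)

theorem rotate_small_shape {board : List (List Int)} {level : Int} {h : Nat}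
    (hh : h = 2 ^ (level - 1).toNat) (hs : 2 ^ level.toNat = 2 * h) :
    pvShape (2 * h) (rotate_small board level) := by
  rw [rotate_small_eq_apply, ← hh, hs]
  exact pvApply_shape _ (pvShape_replicate (2 * h))

-- grid extensionality
theorem pvGrid_ext {s : Nat} {g1 g2 : List (List Int)}
    (h1 : pvShape s g1) (h2 : pvShape s g2)
    (he : ∀ r < s, ∀ c < s, pvGet2 g1 r c = pvGet2 g2 r c) : g1 = g2 := by
  obtain ⟨hl1, hr1⟩ := h1
  obtain ⟨hl2, hr2⟩ := h2
  refine List.ext_getElem (by omega) ?_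
  intro r hra hrb
  have hrs : r < s := by omega
  have e1 : g1[r] = g1.getD r [] := by
    rw [List.getD_eq_getElem?_getD, List.getElem?_eq_getElem hra]; rfl
  have e2 : g2[r] = g2.getD r [] := by
    rw [List.getD_eq_getElem?_getD, List.getElem?_eq_getElem hrb]; rfl
  rw [e1, e2]
  refine List.ext_getElem (by rw [hr1 r hrs, hr2 r hrs]) ?_
  intro c hca hcb
  have hcs : c < s := by rw [hr1 r hrs] at hca; exact hca
  have := he r hrs c hcs
  rw [pvGet2, pvGet2, List.getD_eq_getElem _ _ hca, List.getD_eq_getElem _ _ hcb] at this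
  exact this

-- getD arithmetic on append / take / drop
theorem pv_getD_append (l1 l2 : List Int) (c : Nat) :
    (l1 ++ l2).getD c 0 = if c < l1.length then l1.getD c 0 else l2.getD (c - l1.length) 0 := by
  by_cases hc : c < l1.length <;>
    simp [List.getD_eq_getElem?_getD, List.getElem?_append, hc]

theorem pv_getD_take (l : List Int) (h c : Nat) (hc : c < h) :
    (l.take h).getD c 0 = l.getD c 0 := by
  simp [List.getD_eq_getElem?_getD, hc]

theorem pv_getD_drop (l : List Int) (h c : Nat) :
    (l.drop h).getD c 0 = l.getD (h + c) 0 := by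
  simp [List.getD_eq_getElem?_getD, List.getElem?_drop]

theorem pv_length_take (l : List Int) (h : Nat) (hl : h ≤ l.length) :
    (l.take h).length = h := by
  simp [List.length_take]; omega

-- rows of B's result
theorem alt_row_lt {board : List (List Int)} {level : Int} {h r : Nat}
    (hh : h = 2 ^ (level - 1).toNat) (hr : r < h) :
    (rotate_small_alt board level).getD r [] =
      (board.getD (r + h) []).take h ++ (board.getD r []).take h := by
  subst hh
  simp only [rotate_small_alt, List.getD_eq_getElem?_getD, List.getElem?_append,
    List.length_map, List.length_range]
  rw [if_pos hr, List.getElem?_map, List.getElem?_range hr]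
  rfl

theorem alt_row_ge {board : List (List Int)} {level : Int} {h r : Nat}
    (hh : h = 2 ^ (level - 1).toNat) (hr1 : h ≤ r) (hr2 : r < 2 * h) :
    (rotate_small_alt board level).getD r [] =
      ((board.getD r []).drop h).take h ++ ((board.getD (r - h) []).drop h).take h := by
  have e : r - h + h = r := by omega
  subst hh
  simp only [rotate_small_alt, List.getD_eq_getElem?_getD, List.getElem?_append,
    List.length_map, List.length_range]
  rw [if_neg (by omega), List.getElem?_map, List.getElem?_range (by omega : r - 2 ^ (level - 1).toNat < 2 ^ (level - 1).toNat)]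
  simp only [Option.map_some, Option.getD_some]
  rw [e]

theorem alt_shape {board : List (List Int)} {level : Int} {h : Nat}
    (hh : h = 2 ^ (level - 1).toNat)
    (hrow : ∀ r < 2 * h, 2 * h ≤ (board.getD r []).length) :
    pvShape (2 * h) (rotate_small_alt board level) := by
  constructor
  · subst hh; simp [rotate_small_alt]; ring
  · intro r hr
    by_cases h1 : r < h
    · rw [alt_row_lt hh h1, List.length_append,
        pv_length_take _ _ (by have := hrow (r + h) (by omega); omega),
        pv_length_take _ _ (by have := hrow r (by omega); omega)]
      omega
    · rw [alt_row_ge hh (by omega) hr, List.length_append,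
        pv_length_take _ _ (by rw [List.length_drop]; have := hrow r hr; omega),
        pv_length_take _ _ (by rw [List.length_drop]; have := hrow (r - h) (by omega); omega)]
      omega

theorem alt_at {board : List (List Int)} {level : Int} {h r c : Nat}
    (hh : h = 2 ^ (level - 1).toNat)
    (hrow : ∀ r < 2 * h, 2 * h ≤ (board.getD r []).length)
    (hr : r < 2 * h) (hc : c < 2 * h) :
    pvGet2 (rotate_small_alt board level) r c = pvSrc board h r c := by
  unfold pvGet2 pvSrc
  by_cases h1 : r < h
  · rw [alt_row_lt hh h1, if_pos h1,
      pv_getD_append, pv_length_take _ _ (by have := hrow (r + h) (by omega); omega)]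
    by_cases h2 : c < h
    · rw [if_pos h2, if_pos h2, pv_getD_take _ _ _ h2]
      rfl
    · rw [if_neg h2, if_neg h2, pv_getD_take _ _ _ (by omega)]
      rfl
  · rw [alt_row_ge hh (by omega) hr, if_neg h1,
      pv_getD_append, pv_length_take _ _ (by rw [List.length_drop]; have := hrow r hr; omega)]
    by_cases h2 : c < h
    · rw [if_pos h2, if_pos h2, pv_getD_take _ _ _ h2, pv_getD_drop]
      show (board.getD r []).getD (h + c) 0 = (board.getD r []).getD (c + h) 0
      congr 1
      omega
    · rw [if_neg h2, if_neg h2, pv_getD_take _ _ _ (by omega), pv_getD_drop]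
      show (board.getD (r - h) []).getD (h + (c - h)) 0 = (board.getD (r - h) []).getD c 0
      congr 1
      omega

-- ===== VERDICT (by name: the statement is the Claim_ definition above) =====
theorem rotate_small_spec : Claim_equal_rotate_small := by
  intro board level _ hpre
  unfold Spec_rotate_small
  obtain ⟨hl1, hl2, hl3, hl4⟩ := hpre
  set h := 2 ^ (level - 1).toNat with hh
  have hs : 2 ^ level.toNat = 2 * h := by
    have e : level.toNat = (level - 1).toNat + 1 := by omega
    rw [e, pow_succ, hh]; ring
  have hrow : ∀ r < 2 * h, 2 * h ≤ (board.getD r []).length := by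
    intro r hr
    have hrl : r < board.length := by omega
    have hm : board[r] ∈ board.take (2 * h) := by
      have hrt : r < (board.take (2 * h)).length := by simp [List.length_take]; omega
      have := List.getElem_mem hrt
      rwa [List.getElem_take] at this
    have := hl4 _ hm
    rw [List.getD_eq_getElem _ _ hrl]
    omega
  exact pvGrid_ext (rotate_small_shape hh hs) (alt_shape hh hrow)
    (fun r hr c hc => by rw [rotate_small_at hh hs hr hc, alt_at hh hrow hr hc])
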